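-- pv_equiv track=rewrite | github.com/KailynnCo/Python-Burger-Restaurant | order.py | topthreeburger
-- ===== SOURCE A (Python) =====
-- def topthreeburger(burgers):
--     countc = 0
--     counth = 0
--     countb = 0
--     countd = 0
--     countj = 0
--     counti = 0
--     grandtotal = 0
--     for i in range(len(burgers)):
--         if burgers[i] == "cheese":
--             countc += 1 #add +1 for a loop,every time someone order a chesse it while add up
--         elif burgers[i] == "hamburger":
--             counth += 1
--         elif burgers[i] == "bacon":
--             countb += 1
--         elif burgers[i] == "double":
--             countd += 1
--         elif burgers[i] == "jalapeno":
--             countj += 1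
--         elif burgers[i] == "impossible":
--             counti += 1
--     grandtotal += (12 * countc) + (10 * counth) + (9 * countb) + (15 * countd) + (8 * countj) + (14 * counti) #for grantal toal we have to multiple by the cost then add those for the grandtotal
--     burgernamelist = ["cheese", "hamburger", "bacon", "double", "jalapeno", "impossible"]
--     total_burgers = [countc, counth, countb, countd, countj, counti] #these are the total burgers
--     return burgernamelist, total_burgers, grandtotal #return statements
-- ===== SOURCE B (Python) =====
-- MENU = [("cheese", 12), ("hamburger", 10), ("bacon", 9),
--         ("double", 15), ("jalapeno", 8), ("impossible", 14)]
--
-- def topthreeburger(burgers):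
--     counts = [burgers.count(name) for name, _ in MENU]
--     grandtotal = sum(c * price for c, (_, price) in zip(counts, MENU))
--     return [name for name, _ in MENU], counts, grandtotal
-- ===== Notes on version B (the rewrite author's own statement) =====
-- stated objective: idiomatic
-- what changed: Replaces the six hand-rolled counters updated in one if/elif chain over indices by a price table and list.count per menu name, with the total computed as sum(count*price) over the table.
import Mathlib
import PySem

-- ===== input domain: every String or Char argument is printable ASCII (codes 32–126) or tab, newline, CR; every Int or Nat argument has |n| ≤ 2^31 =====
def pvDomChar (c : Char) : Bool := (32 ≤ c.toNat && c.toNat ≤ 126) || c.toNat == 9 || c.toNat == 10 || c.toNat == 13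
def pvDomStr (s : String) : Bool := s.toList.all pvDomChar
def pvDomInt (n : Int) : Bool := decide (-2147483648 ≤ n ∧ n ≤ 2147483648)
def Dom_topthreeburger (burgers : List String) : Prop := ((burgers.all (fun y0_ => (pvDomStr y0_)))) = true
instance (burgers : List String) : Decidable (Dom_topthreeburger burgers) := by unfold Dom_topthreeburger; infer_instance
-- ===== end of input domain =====

-- B replaces A's six hand-rolled counters and if/elif chain by a price table,
-- list.count per menu name, and sum(count*price); objective: idiomatic.

-- ===== PORT A =====
-- A's if/elif chain over the index loop, state = the six counters.
def topthreeburgerStep (s : Int × Int × Int × Int × Int × Int) (x : String) :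
    Int × Int × Int × Int × Int × Int :=
  let (c, h, b, d, j, i) := s
  if x = "cheese" then (c + 1, h, b, d, j, i)
  else if x = "hamburger" then (c, h + 1, b, d, j, i)
  else if x = "bacon" then (c, h, b + 1, d, j, i)
  else if x = "double" then (c, h, b, d + 1, j, i)
  else if x = "jalapeno" then (c, h, b, d, j + 1, i)
  else if x = "impossible" then (c, h, b, d, j, i + 1)
  else (c, h, b, d, j, i)

def topthreeburger (burgers : List String) : List String × List Int × Int :=
  -- for i in range(len(burgers)): ... burgers[i] ...  (index always in range, so pyGetD is exact)
  let s := (PySem.List.pyRange 0 burgers.length 1).foldl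
    (fun acc idx => topthreeburgerStep acc (PySem.List.pyGetD burgers idx "")) (0, 0, 0, 0, 0, 0)
  let grandtotal := 0 + ((12 * s.1) + (10 * s.2.1) + (9 * s.2.2.1) + (15 * s.2.2.2.1)
      + (8 * s.2.2.2.2.1) + (14 * s.2.2.2.2.2))
  (["cheese", "hamburger", "bacon", "double", "jalapeno", "impossible"],
   [s.1, s.2.1, s.2.2.1, s.2.2.2.1, s.2.2.2.2.1, s.2.2.2.2.2], grandtotal)

-- ===== PORT B =====
def pvMenu : List (String × Int) :=
  [("cheese", 12), ("hamburger", 10), ("bacon", 9), ("double", 15), ("jalapeno", 8), ("impossible", 14)]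

def topthreeburger_alt (burgers : List String) : List String × List Int × Int :=
  let counts := pvMenu.map (fun p => (PySem.List.count burgers p.1 : Int))
  let grandtotal := (counts.zip pvMenu).foldl (fun acc x => acc + x.1 * x.2.2) 0
  (pvMenu.map Prod.fst, counts, grandtotal)

-- ===== PRECONDITION & SPEC =====
def Spec_topthreeburger (burgers : List String) (out : List String × List Int × Int) : Prop := out = topthreeburger_alt burgers
instance (burgers : List String) (out : List String × List Int × Int) : Decidable (Spec_topthreeburger burgers out) := by unfold Spec_topthreeburger; infer_instance

-- ===== CLAIM (what is proved, stated in full; the proofs are below) =====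
def Claim_equal_topthreeburger : Prop := ∀ (burgers : List String), Dom_topthreeburger burgers → Spec_topthreeburger burgers (topthreeburger burgers)

-- ===== LEMMAS AND PROOFS =====

theorem topthreeburgerStep_eq (s : Int × Int × Int × Int × Int × Int) (x : String) :
    topthreeburgerStep s x =
      (s.1 + (if x = "cheese" then 1 else 0), s.2.1 + (if x = "hamburger" then 1 else 0),
       s.2.2.1 + (if x = "bacon" then 1 else 0), s.2.2.2.1 + (if x = "double" then 1 else 0),
       s.2.2.2.2.1 + (if x = "jalapeno" then 1 else 0),
       s.2.2.2.2.2 + (if x = "impossible" then 1 else 0)) := by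
  obtain ⟨c, h, b, d, j, i⟩ := s
  unfold topthreeburgerStep
  split_ifs <;> simp_all

theorem topthreeburger_fold_eq (burgers : List String)
    (c h b d j i : Int) :
    burgers.foldl topthreeburgerStep (c, h, b, d, j, i) =
      (c + burgers.count "cheese", h + burgers.count "hamburger",
       b + burgers.count "bacon", d + burgers.count "double",
       j + burgers.count "jalapeno", i + burgers.count "impossible") := by
  induction burgers generalizing c h b d j i with
  | nil => simp
  | cons x xs ih =>
    rw [List.foldl_cons, topthreeburgerStep_eq, ih]
    simp only [List.count_cons]
    refine Prod.ext ?_ (Prod.ext ?_ (Prod.ext ?_ (Prod.ext ?_ (Prod.ext ?_ ?_)))) <;>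
      simp only [] <;> split_ifs <;> simp_all <;> ring

-- ===== VERDICT (by name: the statement is the Claim_ definition above) =====
theorem topthreeburger_spec : Claim_equal_topthreeburger := by
  intro burgers _
  unfold Spec_topthreeburger topthreeburger topthreeburger_alt
  simp only [PySem.List.foldl_pyRange_zero_pyGetD', topthreeburger_fold_eq, pvMenu]
  simp [PySem.List.count]
  ring
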